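-- pv_equiv track=rewrite | github.com/shoredata/galvanize-dsi | dsi-week-zero/day-2-collections-and-iteration/solutions/solutions.py | make_triangle
-- ===== SOURCE A (Python) =====
-- def make_triangle(n):
--     triangle = []
--     current_number = 1
--     for i in range(n):
--         inner_list = []
--         for j in range(i + 1):
--             inner_list.append(current_number)
--             current_number = current_number + 1
--         triangle.append(inner_list)
--     return triangle
-- ===== SOURCE B (Python) =====
-- def make_triangle(n):
--     result = []
--     for i in range(n):
--         start = i * (i + 1) // 2 + 1
--         result.append(list(range(start, start + i + 1)))
--     return result
-- ===== Notes on version B (the rewrite author's own statement) =====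
-- stated objective: simpler
-- what changed: Replaces the threaded current_number counter and the inner per-element append loop with a closed-form row start (i-th triangular number + 1) and a single range() per row.
import Mathlib
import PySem

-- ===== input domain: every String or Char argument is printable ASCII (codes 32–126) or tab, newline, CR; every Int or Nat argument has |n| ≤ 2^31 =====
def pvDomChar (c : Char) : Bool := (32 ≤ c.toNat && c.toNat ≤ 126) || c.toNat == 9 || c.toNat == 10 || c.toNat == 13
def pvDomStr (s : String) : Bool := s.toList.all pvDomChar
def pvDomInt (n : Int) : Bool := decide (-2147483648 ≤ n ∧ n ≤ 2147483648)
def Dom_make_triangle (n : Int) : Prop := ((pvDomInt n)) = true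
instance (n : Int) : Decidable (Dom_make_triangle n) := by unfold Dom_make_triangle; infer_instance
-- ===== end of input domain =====

-- B replaces A's threaded running counter and inner append loop by a closed-form
-- row start (i-th triangular number + 1) and one range() per row (objective: simpler).

-- ===== PORT A =====
-- triangle = []; current_number = 1; for i in range(n): inner loop appends and increments
def make_triangle (n : Int) : List (List Int) :=
  ((PySem.List.pyRange 0 n 1).foldl
    (fun (st : List (List Int) × Int) (i : Int) =>
      let inner := (PySem.List.pyRange 0 (i + 1) 1).foldl
        (fun (p : List Int × Int) (_ : Int) => (p.1 ++ [p.2], p.2 + 1))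
        (([] : List Int), st.2)
      (st.1 ++ [inner.1], inner.2))
    (([] : List (List Int)), 1)).1

-- ===== PORT B =====
-- for i in range(n): start = i*(i+1)//2 + 1; row = list(range(start, start+i+1))
def make_triangle_alt (n : Int) : List (List Int) :=
  (PySem.List.pyRange 0 n 1).map (fun i =>
    let start := PySem.Int.floordiv (i * (i + 1)) 2 + 1
    PySem.List.pyRange start (start + i + 1) 1)

-- ===== PRECONDITION & SPEC =====
def Spec_make_triangle (n : Int) (out : List (List Int)) : Prop := out = make_triangle_alt n
instance (n : Int) (out : List (List Int)) : Decidable (Spec_make_triangle n out) := by unfold Spec_make_triangle; infer_instance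

-- ===== CLAIM (what is proved, stated in full; the proofs are below) =====
def Claim_equal_make_triangle : Prop := ∀ (n : Int), Dom_make_triangle n → Spec_make_triangle n (make_triangle n)

-- ===== LEMMAS AND PROOFS =====

-- A's inner loop builds the consecutive run [c, c+1, …, c+m-1] and leaves counter c+m.
lemma inner_loop_eq (m : Nat) (c : Int) :
    (PySem.List.pyRange 0 (m : Int) 1).foldl
      (fun (p : List Int × Int) (_ : Int) => (p.1 ++ [p.2], p.2 + 1)) (([] : List Int), c)
    = (PySem.List.pyRange c (c + m) 1, c + m) := by
  suffices h : ∀ (acc : List Int),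
      (PySem.List.pyRange 0 (m : Int) 1).foldl
        (fun (p : List Int × Int) (_ : Int) => (p.1 ++ [p.2], p.2 + 1)) (acc, c)
      = (acc ++ PySem.List.pyRange c (c + m) 1, c + m) by
    simpa using h []
  induction m with
  | zero => intro acc; simp [PySem.List.pyRange_one_eq_nil]
  | succ k ih =>
    intro acc
    have h1 : ((k : Int) + 1) = ((k + 1 : Nat) : Int) := by push_cast; ring
    rw [← h1, PySem.List.pyRange_one_succ_right (by positivity), List.foldl_append, ih]
    have h2 : c + ((k : Int) + 1) = (c + k) + 1 := by ring
    rw [h2, PySem.List.pyRange_one_succ_right (by omega)]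
    simp

-- triangular-number step: (k+1)(k+2)//2 = k(k+1)//2 + (k+1)
lemma tri_step (k : Int) :
    PySem.Int.floordiv ((k + 1) * (k + 2)) 2 = PySem.Int.floordiv (k * (k + 1)) 2 + (k + 1) := by
  rw [PySem.Int.floordiv_eq_ediv_of_pos (by norm_num),
      PySem.Int.floordiv_eq_ediv_of_pos (by norm_num)]
  have h : (k + 1) * (k + 2) = k * (k + 1) + (k + 1) * 2 := by ring
  rw [h, Int.add_mul_ediv_right _ _ (by norm_num)]

-- A's outer fold over range(0,k) produces exactly B's rows, with counter T(k)+1.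
lemma outer_loop_eq (k : Nat) :
    (PySem.List.pyRange 0 (k : Int) 1).foldl
      (fun (st : List (List Int) × Int) (i : Int) =>
        let inner := (PySem.List.pyRange 0 (i + 1) 1).foldl
          (fun (p : List Int × Int) (_ : Int) => (p.1 ++ [p.2], p.2 + 1))
          (([] : List Int), st.2)
        (st.1 ++ [inner.1], inner.2))
      (([] : List (List Int)), 1)
    = (make_triangle_alt (k : Int), PySem.Int.floordiv ((k : Int) * (k + 1)) 2 + 1) := by
  induction k with
  | zero =>
    simp [make_triangle_alt, PySem.List.pyRange_one_eq_nil]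
  | succ m ih =>
    have h1 : ((m + 1 : Nat) : Int) = (m : Int) + 1 := by push_cast; ring
    rw [h1, PySem.List.pyRange_one_succ_right (by positivity), List.foldl_append, ih]
    have hm1 : ((m : Int) + 1) = ((m + 1 : Nat) : Int) := by push_cast; ring
    have hinner := inner_loop_eq (m + 1) (PySem.Int.floordiv ((m : Int) * (m + 1)) 2 + 1)
    rw [← hm1] at hinner
    simp only [List.foldl_cons, List.foldl_nil, hinner]
    unfold make_triangle_alt
    rw [PySem.List.pyRange_one_succ_right (by positivity), List.map_append]
    have hstep := tri_step (m : Int)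
    refine Prod.ext ?_ ?_
    · simp only [List.map_cons, List.map_nil]
      rw [show PySem.Int.floordiv ((m : Int) * ((m : Int) + 1)) 2 + 1 + ((m : Int) + 1)
            = PySem.Int.floordiv ((m : Int) * ((m : Int) + 1)) 2 + 1 + (m : Int) + 1 by ring]
    · simp only
      rw [show ((m : Int) + 1) * ((m : Int) + 1 + 1) = ((m : Int) + 1) * ((m : Int) + 2) by ring,
        hstep]
      ring

-- ===== VERDICT (by name: the statement is the Claim_ definition above) =====
theorem make_triangle_spec : Claim_equal_make_triangle := by
  intro n _
  unfold Spec_make_triangle make_triangle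
  by_cases hn : n ≤ 0
  · rw [PySem.List.pyRange_one_eq_nil hn]
    unfold make_triangle_alt
    rw [PySem.List.pyRange_one_eq_nil hn]
    rfl
  · have h : n = ((n.toNat : Nat) : Int) := by omega
    rw [h, outer_loop_eq]
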